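-- pv_equiv track=rewrite | github.com/scroynel/Coding-Challenges | letterCount.py | LetterCountI
-- ===== SOURCE A (Python) =====
-- def LetterCountI(str):
--     text = str.split()
--
--     count = 0
--     word = ''
--
--     for i in range(len(text)):
--         for j in range(len(text[i])):
--             count_letter = 0
--             for k in range(j+1, len(text[i])):
--                 if text[i][j] == text[i][k]:
--                     count_letter += 1
--             if count_letter > count:
--                 count = count_letter
--                 word = text[i]
--
--     return word
-- ===== SOURCE B (Python) =====
-- def LetterCountI(str):
--     best = 0
--     word = ''
--     for w in str.split():
--         freq = {}
--         m = 0
--         for c in w: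
--             n = freq.get(c, 0) + 1
--             freq[c] = n
--             if n > m:
--                 m = n
--         if m - 1 > best:
--             best = m - 1
--             word = w
--     return word
-- ===== Notes on version B (the rewrite author's own statement) =====
-- stated objective: faster
-- what changed: A counts, for every position of every word, the occurrences of that letter in the rest of the word with two nested index loops; B makes a single pass per word building a character-frequency dict while tracking the running maximum frequency, then compares max_frequency - 1 against the best.
import Mathlib
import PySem

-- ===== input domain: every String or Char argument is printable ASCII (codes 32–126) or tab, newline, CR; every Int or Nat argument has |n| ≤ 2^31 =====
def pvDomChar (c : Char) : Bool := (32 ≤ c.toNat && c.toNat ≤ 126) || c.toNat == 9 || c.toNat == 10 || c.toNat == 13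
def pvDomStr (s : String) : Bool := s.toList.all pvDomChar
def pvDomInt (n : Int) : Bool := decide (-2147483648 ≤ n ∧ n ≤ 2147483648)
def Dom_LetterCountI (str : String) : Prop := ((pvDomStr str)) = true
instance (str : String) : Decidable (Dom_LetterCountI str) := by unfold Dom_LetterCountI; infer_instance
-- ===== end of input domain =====

-- B replaces A's per-word quadratic suffix-counting (for each position, scan the rest of the word)
-- by a single pass per word that builds a character-frequency dict while tracking the running maximum.

-- ===== PORT A =====
-- string indexing s[j] and len(s) are ported on the code-point list s.toList (PySem.List.pyGetD / len)
def LetterCountI (str : String) : String :=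
  let text : List String := PySem.Str.split₀ str
  let st : Int × String :=
    (PySem.List.pyRange 0 (PySem.List.len text) 1).foldl (fun st i =>
      let w : String := PySem.List.pyGetD text i ""
      let cs : List Char := w.toList
      (PySem.List.pyRange 0 (PySem.List.len cs) 1).foldl (fun st j =>
        let countLetter : Int :=
          (PySem.List.pyRange (j + 1) (PySem.List.len cs) 1).foldl (fun c k =>
            if PySem.List.pyGetD cs j ' ' == PySem.List.pyGetD cs k ' ' then c + 1 else c) 0
        if countLetter > st.1 then (countLetter, w) else st) st) ((0 : Int), "")
  st.2

-- ===== PORT B =====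
def LetterCountI_alt (str : String) : String :=
  let st : Int × String :=
    (PySem.Str.split₀ str).foldl (fun st w =>
      let fm : PySem.Dict Char Int × Int :=
        w.toList.foldl (fun fm c =>
          let n : Int := fm.1.getD c 0 + 1
          (fm.1.insert c n, if n > fm.2 then n else fm.2)) (PySem.Dict.empty, 0)
      if fm.2 - 1 > st.1 then (fm.2 - 1, w) else st) ((0 : Int), "")
  st.2

-- ===== PRECONDITION & SPEC =====
def Spec_LetterCountI (str : String) (out : String) : Prop := out = LetterCountI_alt str
instance (str : String) (out : String) : Decidable (Spec_LetterCountI str out) := by unfold Spec_LetterCountI; infer_instance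

-- ===== CLAIM (what is proved, stated in full; the proofs are below) =====
def Claim_equal_LetterCountI : Prop := ∀ (str : String), Dom_LetterCountI str → Spec_LetterCountI str (LetterCountI str)

-- ===== LEMMAS AND PROOFS =====

-- max letter multiplicity of a word (0 for the empty word)
def pvMx (cs : List Char) : Int := cs.foldl (fun acc c => max acc ((cs.count c : Nat) : Int)) 0

-- A's per-word loop body / B's per-word loop body, as standalone functions
def pvStepA (st : Int × String) (w : String) : Int × String :=
  (PySem.List.pyRange 0 (PySem.List.len w.toList) 1).foldl (fun st j =>
    let countLetter : Int :=
      (PySem.List.pyRange (j + 1) (PySem.List.len w.toList) 1).foldl (fun c k =>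
        if PySem.List.pyGetD w.toList j ' ' == PySem.List.pyGetD w.toList k ' ' then c + 1 else c) 0
    if countLetter > st.1 then (countLetter, w) else st) st

def pvStepB (st : Int × String) (w : String) : Int × String :=
  let fm : PySem.Dict Char Int × Int :=
    w.toList.foldl (fun fm c =>
      let n : Int := fm.1.getD c 0 + 1
      (fm.1.insert c n, if n > fm.2 then n else fm.2)) (PySem.Dict.empty, 0)
  if fm.2 - 1 > st.1 then (fm.2 - 1, w) else st

lemma pvA_eq_fold (str : String) :
    LetterCountI str = ((PySem.Str.split₀ str).foldl pvStepA ((0 : Int), "")).2 := by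
  unfold LetterCountI
  exact congrArg Prod.snd
    (PySem.List.foldl_pyRange_zero_pyGetD (PySem.Str.split₀ str) "" pvStepA ((0 : Int), ""))

lemma pvB_eq_fold (str : String) :
    LetterCountI_alt str = ((PySem.Str.split₀ str).foldl pvStepB ((0 : Int), "")).2 := by
  rfl

-- generic: an upper bound for a running max over a projection
lemma pv_foldl_max_le {α : Type} (l : List α) (f : α → Int) (a b : Int)
    (ha : a ≤ b) (hf : ∀ x ∈ l, f x ≤ b) :
    l.foldl (fun acc x => max acc (f x)) a ≤ b := by
  induction l generalizing a with
  | nil => exact ha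
  | cons x t ih =>
    exact ih _ (max_le ha (hf x (by simp))) (fun y hy => hf y (by simp [hy]))

lemma pvMx_nonneg (cs : List Char) : 0 ≤ pvMx cs := by
  exact (PySem.List.le_foldl_max_int cs (fun c => ((cs.count c : Nat) : Int)) 0).1

-- the step recurrence for pvMx
lemma pvMx_append (p : List Char) (c : Char) :
    pvMx (p ++ [c]) = max (pvMx p) ((p.count c : Int) + 1) := by
  have hc : ∀ x : Char, (p ++ [c]).count x = p.count x + if x = c then 1 else 0 := by
    intro x
    by_cases h : x = c
    · simp [List.count_append, h]
    · have h' : ¬ c = x := fun e => h e.symm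
      simp [List.count_append, h, h']
  have hmem := (PySem.List.le_foldl_max_int (p ++ [c])
    (fun a => (((p ++ [c]).count a : Nat) : Int)) 0).2
  have hmemp := (PySem.List.le_foldl_max_int p (fun a => ((p.count a : Nat) : Int)) 0).2
  apply le_antisymm
  · apply pv_foldl_max_le
    · exact le_trans (pvMx_nonneg p) (le_max_left _ _)
    · intro x hx
      by_cases hxc : x = c
      · subst hxc
        rw [hc x]
        push_cast
        exact le_trans (by omega) (le_max_right (pvMx p) _)
      · have hxp : x ∈ p := by
          rcases List.mem_append.1 hx with h | h
          · exact h
          · simp at h; exact absurd h hxc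
        rw [hc x]
        simp only [if_neg hxc]
        exact le_trans (by exact_mod_cast hmemp x hxp) (le_max_left _ _)
  · apply max_le
    · apply pv_foldl_max_le
      · exact pvMx_nonneg (p ++ [c])
      · intro x hx
        refine le_trans ?_ (hmem x (List.mem_append_left _ hx))
        have := hc x
        by_cases h : x = c <;> simp [this, h]
    · have hcmem := hmem c (by simp)
      have := hc c
      rw [if_pos rfl] at this
      calc ((p.count c : Int) + 1) = (((p ++ [c]).count c : Nat) : Int) := by rw [this]; push_cast; ring
        _ ≤ _ := hcmem

-- B's per-word inner fold computes the counter and the max multiplicity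
lemma pvB_inner (cs : List Char) :
    cs.foldl (fun fm c =>
        let n : Int := fm.1.getD c 0 + 1
        (fm.1.insert c n, if n > fm.2 then n else fm.2))
      ((PySem.Dict.empty : PySem.Dict Char Int), 0)
      = (cs.foldl (fun d x => d.insert x (d.getD x 0 + 1)) PySem.Dict.empty, pvMx cs) := by
  have aux : ∀ (cs p : List Char),
      cs.foldl (fun fm c =>
          let n : Int := fm.1.getD c 0 + 1
          (fm.1.insert c n, if n > fm.2 then n else fm.2))
        (p.foldl (fun d x => d.insert x (d.getD x 0 + 1)) PySem.Dict.empty, pvMx p)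
        = ((p ++ cs).foldl (fun d x => d.insert x (d.getD x 0 + 1)) PySem.Dict.empty,
           pvMx (p ++ cs)) := by
    intro cs
    induction cs with
    | nil => intro p; simp
    | cons c t ih =>
      intro p
      have hg : (p.foldl (fun d x => d.insert x (d.getD x 0 + 1)) PySem.Dict.empty).getD c 0
          = (p.count c : Int) := by
        rw [PySem.Dict.getD_foldl_insert_add_one, PySem.Dict.getD_empty]; ring
      simp only [List.foldl_cons]
      have hins : (p ++ [c]).foldl (fun d x => d.insert x (d.getD x 0 + 1)) PySem.Dict.empty
          = (p.foldl (fun d x => d.insert x (d.getD x 0 + 1)) PySem.Dict.empty).insert c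
              ((p.count c : Int) + 1) := by
        simp only [List.foldl_append, List.foldl_cons, List.foldl_nil, hg]
      have hmax : pvMx (p ++ [c])
          = if (p.count c : Int) + 1 > pvMx p then (p.count c : Int) + 1 else pvMx p := by
        rw [pvMx_append]; split_ifs <;> omega
      rw [hg]
      have := ih (p ++ [c])
      rw [hins, hmax] at this
      simpa using this
  have := aux cs []
  simpa using this

-- A's per-position suffix count
def pvCnt (cs : List Char) (k : Nat) : Int := ((cs.drop (k + 1)).count (cs.getD k ' ') : Nat)

lemma pvCnt_le (cs : List Char) (k : Nat) (hk : k < cs.length) : pvCnt cs k ≤ pvMx cs - 1 := by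
  have hx : cs.getD k ' ' = cs[k] := List.getD_eq_getElem cs ' ' hk
  have hsplit := (List.count_append (a := cs.getD k ' ')
    (l₁ := cs.take (k + 1)) (l₂ := cs.drop (k + 1))).symm
  rw [List.take_append_drop] at hsplit
  have hmem : cs.getD k ' ' ∈ cs.take (k + 1) := by
    rw [hx, List.take_add_one, List.getElem?_eq_getElem hk]
    exact List.mem_append_right _ (by simp)
  have h1 : 0 < (cs.take (k + 1)).count (cs.getD k ' ') := List.count_pos_iff.2 hmem
  have hmx : ((cs.count (cs.getD k ' ') : Nat) : Int) ≤ pvMx cs :=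
    (PySem.List.le_foldl_max_int cs (fun c => ((cs.count c : Nat) : Int)) 0).2 _
      (by rw [hx]; exact List.getElem_mem hk)
  unfold pvCnt
  omega

lemma pv_first_occ (cs : List Char) (c : Char) (h : c ∈ cs) :
    ∃ k < cs.length, cs.getD k ' ' = c ∧ (cs.take (k + 1)).count c = 1 := by
  induction cs with
  | nil => cases h
  | cons a t ih =>
    by_cases hac : a = c
    · refine ⟨0, by simp, by simp [hac], ?_⟩
      subst hac
      simp
    · have hct : c ∈ t := by
        rcases List.mem_cons.1 h with h' | h'
        · exact absurd h'.symm hac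
        · exact h'
      obtain ⟨k, hk, hg, hcnt⟩ := ih hct
      refine ⟨k + 1, by simpa using Nat.succ_lt_succ hk, by simpa using hg, ?_⟩
      simp [hcnt, hac]

lemma pvCnt_exists (cs : List Char) (h : cs ≠ []) :
    ∃ k < cs.length, pvCnt cs k = pvMx cs - 1 := by
  have hpv : pvMx cs = (cs.map (fun a => ((cs.count a : Nat) : Int))).foldl max 0 :=
    List.foldl_map.symm
  rcases PySem.List.foldl_max_mem (cs.map (fun a => ((cs.count a : Nat) : Int))) 0 with h0 | hmem
  · exfalso
    obtain ⟨c0, t, rfl⟩ : ∃ c0 t, cs = c0 :: t := by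
      cases cs with
      | nil => exact absurd rfl h
      | cons c0 t => exact ⟨c0, t, rfl⟩
    have hm : ((((c0 :: t).count c0 : Nat)) : Int)
        ∈ (c0 :: t).map (fun a => (((c0 :: t).count a : Nat) : Int)) :=
      List.mem_map_of_mem (a := c0) (by simp)
    have hle := (PySem.List.le_foldl_max ((c0 :: t).map (fun a => (((c0 :: t).count a : Nat) : Int))) 0).2
      _ hm
    rw [h0] at hle
    have : 0 < (c0 :: t).count c0 := List.count_pos_iff.2 (by simp)
    omega
  · obtain ⟨c, hc, hfc⟩ := List.mem_map.1 hmem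
    obtain ⟨k, hk, hgd, hone⟩ := pv_first_occ cs c hc
    have hsplit := (List.count_append (a := c)
      (l₁ := cs.take (k + 1)) (l₂ := cs.drop (k + 1))).symm
    rw [List.take_append_drop] at hsplit
    refine ⟨k, hk, ?_⟩
    unfold pvCnt
    rw [hgd, ← hpv] at *
    rw [hgd]
    omega

-- fold of A's conditional-update loop over a value list
lemma pv_updfold (l : List Int) (w : String) (st : Int × String) :
    l.foldl (fun st v => if v > st.1 then (v, w) else st) st
      = (l.foldl max st.1, if l.foldl max st.1 > st.1 then w else st.2) := by
  induction l generalizing st with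
  | nil => simp
  | cons v t ih =>
    by_cases h : v > st.1
    · simp only [List.foldl_cons, if_pos h, ih]
      have h1 : max st.1 v = v := by omega
      have h2 : v ≤ t.foldl max v := (PySem.List.le_foldl_max t v).1
      simp [h1]
      omega
    · simp only [List.foldl_cons, if_neg h, ih]
      have h1 : max st.1 v = st.1 := by omega
      simp [h1]

lemma pvStepA_char (st : Int × String) (w : String) :
    pvStepA st w = ((List.range w.toList.length).foldl
        (fun st k => if pvCnt w.toList k > st.1 then (pvCnt w.toList k, w) else st) st) := by
  unfold pvStepA
  have hlen : PySem.List.len w.toList = ((w.toList.length : Nat) : Int) := by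
    simp [PySem.List.len]
  rw [hlen, PySem.List.pyRange_zero_nat, List.foldl_map]
  apply PySem.List.foldl_congr_mem
  intro acc k hk
  have hk' : k < w.toList.length := by simpa using hk
  have h3 : ∀ (c : Int) (x : Char),
      (if PySem.List.pyGetD w.toList (k : Int) ' ' == x then c + 1 else c)
        = (if x == w.toList.getD k ' ' then c + 1 else c) := by
    intro c x
    have hpg : PySem.List.pyGetD w.toList (k : Int) ' ' = w.toList.getD k ' ' := by simp
    rw [hpg]
    simp only [beq_iff_eq]
    by_cases h : x = w.toList.getD k ' '
    · rw [if_pos h.symm, if_pos h]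
    · rw [if_neg (fun e => h e.symm), if_neg h]
  have h1 := PySem.List.foldl_pyRange_pyGetD' w.toList ' '
    (fun (c : Int) x => if PySem.List.pyGetD w.toList (k : Int) ' ' == x then c + 1 else c)
    (0 : Int) (a := (k : Int) + 1) (by omega)
  have htn : ((k : Int) + 1).toNat = k + 1 := by omega
  have h2 : (List.drop ((k : Int) + 1).toNat w.toList).foldl
      (fun c x => if PySem.List.pyGetD w.toList (k : Int) ' ' == x then c + 1 else c) 0
      = pvCnt w.toList k := by
    rw [htn]
    have hflip := PySem.List.foldl_congr_mem (List.drop (k + 1) w.toList)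
      (fun c x => if PySem.List.pyGetD w.toList (k : Int) ' ' == x then c + 1 else c)
      (fun c x => if x == w.toList.getD k ' ' then c + 1 else c) 0
      (fun acc x _ => h3 acc x)
    have hcount := PySem.List.foldl_beq_add_one (List.drop (k + 1) w.toList)
      (w.toList.getD k ' ') 0
    exact hflip.trans (hcount.trans (by simp [pvCnt]))
  have hinner : (PySem.List.pyRange ((k : Int) + 1) ((w.toList.length : Nat) : Int) 1).foldl
      (fun c x => if PySem.List.pyGetD w.toList (k : Int) ' ' == PySem.List.pyGetD w.toList x ' '
        then c + 1 else c) 0 = pvCnt w.toList k := h1.trans h2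
  rw [hinner]

lemma pv_foldl_max_le' (l : List Int) (a b : Int) (ha : a ≤ b) (hl : ∀ x ∈ l, x ≤ b) :
    l.foldl max a ≤ b := by
  induction l generalizing a with
  | nil => exact ha
  | cons x t ih => exact ih _ (max_le ha (hl x (by simp))) (fun y hy => hl y (by simp [hy]))

lemma pvStepB_char (st : Int × String) (w : String) :
    pvStepB st w = if pvMx w.toList - 1 > st.1 then (pvMx w.toList - 1, w) else st := by
  unfold pvStepB
  rw [pvB_inner]

lemma pv_hL (cs : List Char) (st1 : Int) (hne : cs ≠ []) :
    ((List.range cs.length).map (pvCnt cs)).foldl max st1 = max st1 (pvMx cs - 1) := by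
  apply le_antisymm
  · apply pv_foldl_max_le'
    · exact le_max_left _ _
    · intro x hx
      obtain ⟨k, hk, rfl⟩ := List.mem_map.1 hx
      exact le_trans (pvCnt_le cs k (List.mem_range.1 hk)) (le_max_right _ _)
  · apply max_le
    · exact (PySem.List.le_foldl_max _ _).1
    · obtain ⟨k, hk, he⟩ := pvCnt_exists cs hne
      have hmem : pvCnt cs k ∈ (List.range cs.length).map (pvCnt cs) :=
        List.mem_map_of_mem (List.mem_range.2 hk)
      have := (PySem.List.le_foldl_max ((List.range cs.length).map (pvCnt cs)) st1).2 _ hmem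
      rw [he] at this
      exact this

lemma pvStepA_eq (st : Int × String) (w : String) (h : 0 ≤ st.1) :
    pvStepA st w = pvStepB st w := by
  rw [pvStepA_char, pvStepB_char]
  have hmapfold : (List.range w.toList.length).foldl
        (fun st k => if pvCnt w.toList k > st.1 then (pvCnt w.toList k, w) else st) st
      = ((List.range w.toList.length).map (pvCnt w.toList)).foldl
          (fun st v => if v > st.1 then (v, w) else st) st :=
    (List.foldl_map (f := pvCnt w.toList) (g := fun st v => if v > st.1 then (v, w) else st)
      (l := List.range w.toList.length) (init := st)).symm
  rw [hmapfold, pv_updfold]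
  rcases eq_or_ne w.toList [] with hnil | hne
  · rw [hnil]
    have hmx : pvMx ([] : List Char) = 0 := rfl
    simp only [List.length_nil, List.range_zero, List.map_nil, List.foldl_nil, hmx]
    rw [if_neg (by omega), if_neg (by omega)]
  · rw [pv_hL w.toList st.1 hne]
    by_cases hgt : pvMx w.toList - 1 > st.1
    · have h1 : max st.1 (pvMx w.toList - 1) = pvMx w.toList - 1 := by omega
      rw [h1, if_pos hgt, if_pos hgt]
    · have h1 : max st.1 (pvMx w.toList - 1) = st.1 := by omega
      rw [h1, if_neg (by omega), if_neg hgt]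

lemma pvStepA_fst_nonneg (st : Int × String) (w : String) (h : 0 ≤ st.1) :
    0 ≤ (pvStepA st w).1 := by
  rw [pvStepA_char]
  have hmapfold : (List.range w.toList.length).foldl
        (fun st k => if pvCnt w.toList k > st.1 then (pvCnt w.toList k, w) else st) st
      = ((List.range w.toList.length).map (pvCnt w.toList)).foldl
          (fun st v => if v > st.1 then (v, w) else st) st :=
    (List.foldl_map (f := pvCnt w.toList) (g := fun st v => if v > st.1 then (v, w) else st)
      (l := List.range w.toList.length) (init := st)).symm
  rw [hmapfold, pv_updfold]
  exact le_trans h (PySem.List.le_foldl_max _ _).1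

lemma pv_foldl_eq (text : List String) (st : Int × String) (h : 0 ≤ st.1) :
    text.foldl pvStepA st = text.foldl pvStepB st := by
  induction text generalizing st with
  | nil => rfl
  | cons w t ih =>
    simp only [List.foldl_cons]
    rw [← pvStepA_eq st w h, ih _ (pvStepA_fst_nonneg st w h)]

-- ===== VERDICT (by name: the statement is the Claim_ definition above) =====
theorem LetterCountI_spec : Claim_equal_LetterCountI := by
  intro str _
  unfold Spec_LetterCountI
  rw [pvA_eq_fold, pvB_eq_fold, pv_foldl_eq _ _ (by norm_num)]
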